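-- pv_equiv track=rewrite | github.com/ITfervor/Coding_Study | Python/Programers/5/19/pro42840.py | solution
-- ===== SOURCE A (Python) =====
-- def solution(answers):
--     test = {1:[1,2,3,4,5] ,2:[2,1,2,3,2,4,2,5], 3:[3,3,1,1,2,2,4,4,5,5]}
--     score = {1:0, 2:0, 3:0}
--     for idx, answer in enumerate(answers):
--         for key, value in test.items():
--             if answer == value[idx % len(value)]:
--                 score[key] += 1
--
--     highest = max(score.values())
--     result = [key for key,value in score.items() if value == highest]
--
--     return result
-- ===== SOURCE B (Python) =====
-- def solution(answers):
--     patterns = [[1, 2, 3, 4, 5],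
--                 [2, 1, 2, 3, 2, 4, 2, 5],
--                 [3, 3, 1, 1, 2, 2, 4, 4, 5, 5]]
--     period = 40  # lcm of the pattern lengths: each pattern is constant on residues mod 40
--     counts = {}
--     for i, a in enumerate(answers):
--         key = (i % period, a)
--         counts[key] = counts.get(key, 0) + 1
--     scores = [sum(counts.get((r, p[r % len(p)]), 0) for r in range(period))
--               for p in patterns]
--     best = max(scores)
--     return [k + 1 for k, s in enumerate(scores) if s == best]
-- ===== Notes on version B (the rewrite author's own statement) =====
-- stated objective: alternative
-- what changed: B builds a histogram (dict counter) of pairs (position mod 40, answer) in one pass that never looks at the patterns, then scores each pattern as a sum of 40 counter lookups over the residue classes (40 = lcm of the pattern lengths), instead of A's per-answer loop that compares every answer against each pattern via modulo indexing.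
import Mathlib
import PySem

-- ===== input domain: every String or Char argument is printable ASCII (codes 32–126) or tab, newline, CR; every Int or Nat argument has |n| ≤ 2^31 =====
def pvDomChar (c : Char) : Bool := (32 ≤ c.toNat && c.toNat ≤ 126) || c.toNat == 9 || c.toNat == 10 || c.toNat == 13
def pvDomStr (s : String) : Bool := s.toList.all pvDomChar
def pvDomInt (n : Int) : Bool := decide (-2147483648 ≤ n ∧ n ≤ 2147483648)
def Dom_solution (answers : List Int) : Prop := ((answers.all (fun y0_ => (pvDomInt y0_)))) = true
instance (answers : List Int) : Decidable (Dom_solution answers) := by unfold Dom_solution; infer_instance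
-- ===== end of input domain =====

-- B replaces A's per-answer pattern comparison by a one-pass histogram of (index mod 40, answer)
-- pairs and scores each pattern as a sum of 40 counter lookups; objective: alternative, same cost.

-- ===== PORT A =====
def solution (answers : List Int) : List Int :=
  let test : PySem.Dict Int (List Int) :=
    PySem.Dict.mk [(1, [1,2,3,4,5]), (2, [2,1,2,3,2,4,2,5]), (3, [3,3,1,1,2,2,4,4,5,5])]
  let score0 : PySem.Dict Int Int := PySem.Dict.mk [(1,0), (2,0), (3,0)]
  let score := (PySem.List.enumerate answers 0).foldl
    (fun sc p => test.items.foldl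
      (fun sc kv =>
        if p.2 = PySem.List.pyGetD kv.2 (PySem.Int.mod p.1 (kv.2.length : Int)) 0
        then sc.modify kv.1 0 (· + 1) else sc) sc) score0
  let highest := (PySem.List.max? score.values (fun v => v)).getD 0
  score.items.filterMap (fun kv => if kv.2 = highest then some kv.1 else none)

-- ===== PORT B =====
-- counts[key] = counts.get(key, 0) + 1  is  d.insert key (d.getD key 0 + 1)
def solution_alt (answers : List Int) : List Int :=
  let patterns : List (List Int) := [[1,2,3,4,5], [2,1,2,3,2,4,2,5], [3,3,1,1,2,2,4,4,5,5]]
  let counts : PySem.Dict (Int × Int) Int :=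
    (PySem.List.enumerate answers 0).foldl
      (fun d q =>
        d.insert (PySem.Int.mod q.1 40, q.2)
          (d.getD (PySem.Int.mod q.1 40, q.2) 0 + 1)) PySem.Dict.empty
  let scores := patterns.map (fun p =>
    ((PySem.List.pyRange 0 40 1).map
      (fun r => counts.getD (r, PySem.List.pyGetD p (PySem.Int.mod r (p.length : Int)) 0) 0)).sum)
  let best := (PySem.List.max? scores (fun v => v)).getD 0
  (PySem.List.enumerate scores 0).filterMap (fun ks => if ks.2 = best then some (ks.1 + 1) else none)

-- ===== PRECONDITION & SPEC =====
def Spec_solution (answers : List Int) (out : List Int) : Prop := out = solution_alt answers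
instance (answers : List Int) (out : List Int) : Decidable (Spec_solution answers out) := by unfold Spec_solution; infer_instance

-- ===== CLAIM (what is proved, stated in full; the proofs are below) =====
def Claim_equal_solution : Prop := ∀ (answers : List Int), Dom_solution answers → Spec_solution answers (solution answers)

-- ===== LEMMAS AND PROOFS =====

-- count of matches of answers against pattern p starting at (Python) index i
def mc (p : List Int) : List Int → Int → Int
  | [], _ => 0
  | a :: rest, i =>
    (if a = PySem.List.pyGetD p (PySem.Int.mod i (p.length : Int)) 0 then 1 else 0) + mc p rest (i + 1)

def stepA (sc : PySem.Dict Int Int) (p : Int × Int) : PySem.Dict Int Int :=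
  ([(1, [1,2,3,4,5]), (2, [2,1,2,3,2,4,2,5]), (3, [3,3,1,1,2,2,4,4,5,5])] :
        List (Int × List Int)).foldl
    (fun sc kv =>
      if p.2 = PySem.List.pyGetD kv.2 (PySem.Int.mod p.1 (kv.2.length : Int)) 0
      then sc.modify kv.1 0 (· + 1) else sc) sc

set_option maxHeartbeats 1000000 in
lemma stepA_lit (a b c i x : Int) :
    stepA (PySem.Dict.mk [(1, a), (2, b), (3, c)]) (i, x)
      = PySem.Dict.mk
          [(1, a + if x = PySem.List.pyGetD [1,2,3,4,5]
                (PySem.Int.mod i (([1,2,3,4,5] : List Int).length : Int)) 0 then 1 else 0),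
           (2, b + if x = PySem.List.pyGetD [2,1,2,3,2,4,2,5]
                (PySem.Int.mod i (([2,1,2,3,2,4,2,5] : List Int).length : Int)) 0 then 1 else 0),
           (3, c + if x = PySem.List.pyGetD [3,3,1,1,2,2,4,4,5,5]
                (PySem.Int.mod i (([3,3,1,1,2,2,4,4,5,5] : List Int).length : Int)) 0 then 1 else 0)] := by
  simp only [stepA, List.foldl_cons, List.foldl_nil]
  simp
  split_ifs <;>
    simp_all [PySem.Dict.modify, PySem.Dict.get?, PySem.Dict.insert, PySem.Dict.contains,
      PySem.Dict.getD]

lemma loopA_aux (ans : List Int) (i a b c : Int) :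
    (PySem.List.enumerate ans i).foldl stepA (PySem.Dict.mk [(1, a), (2, b), (3, c)])
    = PySem.Dict.mk [(1, a + mc [1,2,3,4,5] ans i),
                     (2, b + mc [2,1,2,3,2,4,2,5] ans i),
                     (3, c + mc [3,3,1,1,2,2,4,4,5,5] ans i)] := by
  induction ans generalizing i a b c with
  | nil => simp [PySem.List.enumerate_nil, mc]
  | cons x rest ih =>
    rw [PySem.List.enumerate_cons, List.foldl_cons, stepA_lit, ih]
    simp only [mc]
    ring_nf

lemma loopA (ans : List Int) (i a b c : Int) :
    (PySem.List.enumerate ans i).foldl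
      (fun sc p => ([(1, [1,2,3,4,5]), (2, [2,1,2,3,2,4,2,5]), (3, [3,3,1,1,2,2,4,4,5,5])] :
            List (Int × List Int)).foldl
        (fun sc kv =>
          if p.2 = PySem.List.pyGetD kv.2 (PySem.Int.mod p.1 (kv.2.length : Int)) 0
          then sc.modify kv.1 0 (· + 1) else sc) sc)
      (PySem.Dict.mk [(1, a), (2, b), (3, c)])
    = PySem.Dict.mk [(1, a + mc [1,2,3,4,5] ans i),
                     (2, b + mc [2,1,2,3,2,4,2,5] ans i),
                     (3, c + mc [3,3,1,1,2,2,4,4,5,5] ans i)] :=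
  loopA_aux ans i a b c

-- ---- B side: the histogram sum over residue classes equals the match count ----

-- the pattern's value on residue class r (what B looks up in the counter)
def tbl (p : List Int) (r : Int) : Int :=
  PySem.List.pyGetD p (PySem.Int.mod r (p.length : Int)) 0

lemma tbl_mod (p : List Int) (hp : 0 < p.length) (hdvd : (p.length : Int) ∣ 40) (i : Int) :
    tbl p (PySem.Int.mod i 40) = PySem.List.pyGetD p (PySem.Int.mod i (p.length : Int)) 0 := by
  unfold tbl
  congr 1
  have hpz : (0 : Int) < (p.length : Int) := by exact_mod_cast hp
  rw [PySem.Int.mod_eq_emod_of_pos (a := i) (by decide : (0:Int) < 40),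
      PySem.Int.mod_eq_emod_of_pos (a := i % 40) hpz,
      PySem.Int.mod_eq_emod_of_pos (a := i) hpz]
  exact Int.emod_emod_of_dvd i hdvd

-- the indicator sum over the 40 residue classes picks out exactly the class of c
lemma sum_ind (t : Int → Int) (c x : Int) (h0 : 0 ≤ c) (h40 : c < 40) :
    ((PySem.List.pyRange 0 40 1).map
        (fun r => if ((c, x) == (r, t r) : Bool) then (1 : Int) else 0)).sum
      = if x = t c then 1 else 0 := by
  rw [PySem.List.sum_map_ite_one_zero]
  by_cases hx : x = t c
  · have hcongr : List.countP (fun r => ((c, x) == (r, t r) : Bool)) (PySem.List.pyRange 0 40 1)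
        = List.countP (fun r => (r == c : Bool)) (PySem.List.pyRange 0 40 1) := by
      apply List.countP_congr
      intro r _
      constructor
      · intro h; simp only [beq_iff_eq, Prod.mk.injEq] at h ⊢; omega
      · intro h; simp only [beq_iff_eq] at h; subst h; simp [hx]
    rw [hcongr, ← List.count, List.count_eq_one_of_mem (PySem.List.nodup_pyRange_one 0 40)
      (PySem.List.mem_pyRange_one.mpr ⟨h0, h40⟩)]
    simp [hx]
  · rw [List.countP_eq_zero.mpr, if_neg hx]; · rfl
    intro r _ h
    simp only [beq_iff_eq, Prod.mk.injEq] at h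
    exact hx (h.1 ▸ h.2)

-- main B-side lemma: sum over residue classes of the histogram = match count
lemma sumB (p : List Int) (hp : 0 < p.length) (hdvd : (p.length : Int) ∣ 40) :
    ∀ (ans : List Int) (i : Int),
    ((PySem.List.pyRange 0 40 1).map
        (fun r => (((PySem.List.enumerate ans i).map
              (fun q => (PySem.Int.mod q.1 40, q.2))).count (r, tbl p r) : Int))).sum
      = mc p ans i := by
  intro ans
  induction ans with
  | nil => intro i; simp [PySem.List.enumerate_nil, mc]
  | cons x rest ih =>
    intro i
    rw [PySem.List.enumerate_cons]
    simp only [List.map_cons, List.count_cons]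
    have hsplit :
        ((PySem.List.pyRange 0 40 1).map
            (fun r => ((((PySem.List.enumerate rest (i+1)).map
                  (fun q => (PySem.Int.mod q.1 40, q.2))).count (r, tbl p r)
                + if ((PySem.Int.mod i 40, x) == (r, tbl p r) : Bool) then 1 else 0 : Nat) : Int))).sum
          = ((PySem.List.pyRange 0 40 1).map
              (fun r => (((PySem.List.enumerate rest (i+1)).map
                    (fun q => (PySem.Int.mod q.1 40, q.2))).count (r, tbl p r) : Int))).sum
            + ((PySem.List.pyRange 0 40 1).map
              (fun r => if ((PySem.Int.mod i 40, x) == (r, tbl p r) : Bool) then (1 : Int) else 0)).sum := by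
      rw [← PySem.List.sum_map_add_int]
      apply congrArg
      apply List.map_congr_left
      intro r _
      push_cast [apply_ite]
      split_ifs <;> ring
    rw [hsplit, ih (i+1),
        sum_ind (tbl p) (PySem.Int.mod i 40) x
          (PySem.Int.mod_nonneg i (by decide)) (PySem.Int.mod_lt i (by decide)),
        tbl_mod p hp hdvd i]
    simp only [mc]
    ring

-- B's score for one pattern, read off the counter, is the match count
lemma scoreB (ans L : List Int) (h1 : 0 < L.length) (h2 : (L.length : Int) ∣ 40) :
    ((PySem.List.pyRange 0 40 1).map
        (fun r => (((PySem.List.enumerate ans 0).foldl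
            (fun d q =>
              d.insert (PySem.Int.mod q.1 40, q.2)
                (d.getD (PySem.Int.mod q.1 40, q.2) 0 + 1)) PySem.Dict.empty)).getD
          (r, PySem.List.pyGetD L (PySem.Int.mod r (L.length : Int)) 0) 0)).sum
      = mc L ans 0 := by
  have hfold : ∀ v : Int × Int,
      ((PySem.List.enumerate ans 0).foldl
          (fun d q =>
            d.insert (PySem.Int.mod q.1 40, q.2)
              (d.getD (PySem.Int.mod q.1 40, q.2) 0 + 1)) PySem.Dict.empty).getD v 0
        = (((PySem.List.enumerate ans 0).map (fun q => (PySem.Int.mod q.1 40, q.2))).count v : Int) := by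
    intro v
    rw [← List.foldl_map (f := fun q : Int × Int => (PySem.Int.mod q.1 40, q.2))
          (g := fun d x => PySem.Dict.insert d x (d.getD x 0 + 1)),
        PySem.Dict.getD_foldl_insert_add_one]
    simp
  calc ((PySem.List.pyRange 0 40 1).map
        (fun r => (((PySem.List.enumerate ans 0).foldl
            (fun d q =>
              d.insert (PySem.Int.mod q.1 40, q.2)
                (d.getD (PySem.Int.mod q.1 40, q.2) 0 + 1)) PySem.Dict.empty)).getD
          (r, PySem.List.pyGetD L (PySem.Int.mod r (L.length : Int)) 0) 0)).sum
      = ((PySem.List.pyRange 0 40 1).map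
          (fun r => (((PySem.List.enumerate ans 0).map
                (fun q => (PySem.Int.mod q.1 40, q.2))).count (r, tbl L r) : Int))).sum := by
        apply congrArg
        apply List.map_congr_left
        intro r _
        rw [hfold]
        rfl
    _ = mc L ans 0 := sumB L h1 h2 ans 0

-- ===== VERDICT (by name: the statement is the Claim_ definition above) =====
theorem solution_spec : Claim_equal_solution := by
  intro ans _
  unfold Spec_solution solution solution_alt
  simp only []
  rw [loopA ans 0 0 0 0]
  simp only [List.map_cons, List.map_nil]
  simp only [scoreB ans [1,2,3,4,5] (by decide) (by decide),
      scoreB ans [2,1,2,3,2,4,2,5] (by decide) (by decide),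
      scoreB ans [3,3,1,1,2,2,4,4,5,5] (by decide) (by decide)]
  simp [PySem.Dict.values, PySem.List.enumerate_cons, PySem.List.enumerate_nil, List.filterMap]
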